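-- pv_equiv track=rewrite | github.com/atcupps/mango-bingsu | bitboard/lut-gen/king.py | moves_arr_for_position
-- ===== SOURCE A (Python) =====
-- def moves_arr_for_position(rank: int, file: int) -> list[list[int]]:
--     board = [[0 for _ in range(8)] for _ in range(8)]
--     for r in range(max(0, rank - 1), min(8, rank + 2)):
--         for f in range(max(0, file - 1), min(8, file + 2)):
--             if r == rank and f == file:
--                 continue
--             board[r][f] = 1
--     return board
-- ===== SOURCE B (Python) =====
-- def moves_arr_for_position(rank: int, file: int) -> list[list[int]]:
--     # A square is a king move iff its Chebyshev distance to (rank, file) is exactly 1.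
--     return [[1 if max(abs(r - rank), abs(f - file)) == 1 else 0 for f in range(8)]
--             for r in range(8)]
-- ===== Notes on version B (the rewrite author's own statement) =====
-- stated objective: simpler
-- what changed: Replaces A's board allocation plus in-place mutation over a clamped 3x3 range by a pure per-cell comprehension computing each entry from the Chebyshev distance (max of coordinate differences) == 1.
import Mathlib
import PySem

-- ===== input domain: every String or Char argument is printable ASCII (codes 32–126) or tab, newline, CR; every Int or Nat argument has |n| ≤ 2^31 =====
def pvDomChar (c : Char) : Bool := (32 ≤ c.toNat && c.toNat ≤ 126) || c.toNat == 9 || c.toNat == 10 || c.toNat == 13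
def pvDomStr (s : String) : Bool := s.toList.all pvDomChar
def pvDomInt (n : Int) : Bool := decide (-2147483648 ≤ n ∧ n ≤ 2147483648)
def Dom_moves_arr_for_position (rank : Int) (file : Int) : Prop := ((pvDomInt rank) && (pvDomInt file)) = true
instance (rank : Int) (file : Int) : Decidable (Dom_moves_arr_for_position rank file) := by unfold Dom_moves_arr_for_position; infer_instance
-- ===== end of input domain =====

-- B replaces A's board allocation with in-place mutation over a clamped 3x3 range by a
-- pure per-cell comprehension: cell (r,f) = 1 iff Chebyshev distance to (rank,file) = 1 (simpler).

-- ===== PORT A =====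
-- board[r][f] = 1
def pvSetCell (b : List (List Int)) (r f : Int) : List (List Int) :=
  b.set r.toNat ((b.getD r.toNat []).set f.toNat 1)

def moves_arr_for_position (rank : Int) (file : Int) : List (List Int) :=
  let board := (PySem.List.pyRange 0 8 1).map (fun _ => (PySem.List.pyRange 0 8 1).map (fun _ => (0 : Int)))
  (PySem.List.pyRange (max 0 (rank - 1)) (min 8 (rank + 2)) 1).foldl
    (fun b r =>
      (PySem.List.pyRange (max 0 (file - 1)) (min 8 (file + 2)) 1).foldl
        (fun b2 f => if r = rank ∧ f = file then b2 else pvSetCell b2 r f) b)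
    board

-- ===== PORT B =====
def moves_arr_for_position_alt (rank : Int) (file : Int) : List (List Int) :=
  (PySem.List.pyRange 0 8 1).map (fun r =>
    (PySem.List.pyRange 0 8 1).map (fun f =>
      if max |r - rank| |f - file| = 1 then (1 : Int) else 0))

-- ===== PRECONDITION & SPEC =====
def Spec_moves_arr_for_position (rank : Int) (file : Int) (out : List (List Int)) : Prop := out = moves_arr_for_position_alt rank file
instance (rank : Int) (file : Int) (out : List (List Int)) : Decidable (Spec_moves_arr_for_position rank file out) := by unfold Spec_moves_arr_for_position; infer_instance

-- ===== CLAIM (what is proved, stated in full; the proofs are below) =====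
def Claim_equal_moves_arr_for_position : Prop := ∀ (rank : Int) (file : Int), Dom_moves_arr_for_position rank file → Spec_moves_arr_for_position rank file (moves_arr_for_position rank file)

-- ===== LEMMAS AND PROOFS =====

def pvZeros : List (List Int) := List.replicate 8 (List.replicate 8 0)

theorem pv_foldl_const {α β : Type} (l : List β) (b : α) :
    List.foldl (fun a (_ : β) => a) b l = b := by
  induction l generalizing b with
  | nil => rfl
  | cons x xs ih => simp only [List.foldl_cons]; exact ih b

-- A yields the all-zero board when rank or file is off the 3×3 clamp window.
theorem pvA_zero (rank file : Int)
    (h : rank ≤ -2 ∨ 9 ≤ rank ∨ file ≤ -2 ∨ 9 ≤ file) :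
    moves_arr_for_position rank file = pvZeros := by
  rcases h with h | h | h | h
  · rw [moves_arr_for_position,
      PySem.List.pyRange_one_eq_nil (a := max 0 (rank - 1)) (b := min 8 (rank + 2)) (by omega)]
    simp only [List.foldl_nil]
    decide
  · rw [moves_arr_for_position,
      PySem.List.pyRange_one_eq_nil (a := max 0 (rank - 1)) (b := min 8 (rank + 2)) (by omega)]
    simp only [List.foldl_nil]
    decide
  · rw [moves_arr_for_position,
      PySem.List.pyRange_one_eq_nil (a := max 0 (file - 1)) (b := min 8 (file + 2)) (by omega)]
    simp only [List.foldl_nil]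
    rw [pv_foldl_const]
    decide
  · rw [moves_arr_for_position,
      PySem.List.pyRange_one_eq_nil (a := max 0 (file - 1)) (b := min 8 (file + 2)) (by omega)]
    simp only [List.foldl_nil]
    rw [pv_foldl_const]
    decide

-- B yields the all-zero board there too: no board cell has Chebyshev distance 1.
theorem pvB_zero (rank file : Int)
    (h : rank ≤ -2 ∨ 9 ≤ rank ∨ file ≤ -2 ∨ 9 ≤ file) :
    moves_arr_for_position_alt rank file = pvZeros := by
  unfold moves_arr_for_position_alt
  rw [show PySem.List.pyRange 0 8 1 = ([0,1,2,3,4,5,6,7] : List Int) from by decide]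
  have hcell : ∀ r ∈ ([0,1,2,3,4,5,6,7] : List Int), ∀ f ∈ ([0,1,2,3,4,5,6,7] : List Int),
      (if max |r - rank| |f - file| = 1 then (1 : Int) else 0) = 0 := by
    intro r hr f hf
    fin_cases hr <;> fin_cases hf <;> exact if_neg (by simp only [Int.abs_eq_natAbs]; omega)
  have hrow : ∀ r ∈ ([0,1,2,3,4,5,6,7] : List Int),
      ([0,1,2,3,4,5,6,7] : List Int).map
        (fun f => if max |r - rank| |f - file| = 1 then (1 : Int) else 0)
        = List.replicate 8 0 := by
    intro r hr
    rw [List.map_congr_left (fun f hf => hcell r hr f hf)]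
    rfl
  rw [List.map_congr_left hrow]
  rfl

-- ===== VERDICT (by name: the statement is the Claim_ definition above) =====
theorem moves_arr_for_position_spec : Claim_equal_moves_arr_for_position := by
  intro rank file _
  unfold Spec_moves_arr_for_position
  by_cases h : -1 ≤ rank ∧ rank ≤ 8 ∧ -1 ≤ file ∧ file ≤ 8
  · obtain ⟨h1, h2, h3, h4⟩ := h
    interval_cases rank <;> interval_cases file <;> decide
  · rw [pvA_zero rank file (by omega), pvB_zero rank file (by omega)]
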